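-- pv_equiv track=rewrite | github.com/JunXiaoWen/YTRN | ppocr/data/utils.py | strokes_to_stroke_4
-- ===== SOURCE A (Python) =====
-- def strokes_to_stroke_4(strokes):
--     """所有序列点按照[x1, y1, p1, p2]的方式存于一个列表"""
--     sample = []
--     for stroke in strokes:
--         for point_index in range(0, len(stroke)):
--             if point_index == len(stroke) - 1:
--                 sample.append([stroke[point_index][0], stroke[point_index][1], 1, 0])  # 最后一个表示笔划结束
--             else:
--                 sample.append([stroke[point_index][0], stroke[point_index][1], 0, 1])  # 笔划继续
--
--     target_sample = []
--     target_sample.append([sample[0][0], sample[0][1], 0, 1])  # 不能误失第一个点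
--     for point_index in range(0, len(sample)):
--         if point_index == len(sample) - 1:
--             break
--         else:
--             delta_x = sample[point_index + 1][0] - sample[point_index][0]
--             delta_y = sample[point_index + 1][1] - sample[point_index][1]
--             p1 = sample[point_index + 1][2]
--             p2 = sample[point_index + 1][3]
--             target_sample.append([delta_x, delta_y, p1, p2])
--     return target_sample
-- ===== SOURCE B (Python) =====
-- def strokes_to_stroke_4(strokes):
--     """所有序列点按照[x1, y1, p1, p2]的方式存于一个列表"""
--     out = []
--     prev = None
--     for stroke in strokes:
--         n = len(stroke)
--         for i, point in enumerate(stroke):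
--             x, y = point[0], point[1]
--             if prev is None:
--                 out.append([x, y, 0, 1])
--             elif i == n - 1:
--                 out.append([x - prev[0], y - prev[1], 1, 0])
--             else:
--                 out.append([x - prev[0], y - prev[1], 0, 1])
--             prev = (x, y)
--     return out
-- ===== Notes on version B (the rewrite author's own statement) =====
-- stated objective: simpler
-- what changed: Replaces A's two sequential passes (first materialize a flag-annotated copy of all points, then index-walk it to build deltas) by a single fused pass over the nested strokes that keeps only the previous point and emits each output row directly.
import Mathlib
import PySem

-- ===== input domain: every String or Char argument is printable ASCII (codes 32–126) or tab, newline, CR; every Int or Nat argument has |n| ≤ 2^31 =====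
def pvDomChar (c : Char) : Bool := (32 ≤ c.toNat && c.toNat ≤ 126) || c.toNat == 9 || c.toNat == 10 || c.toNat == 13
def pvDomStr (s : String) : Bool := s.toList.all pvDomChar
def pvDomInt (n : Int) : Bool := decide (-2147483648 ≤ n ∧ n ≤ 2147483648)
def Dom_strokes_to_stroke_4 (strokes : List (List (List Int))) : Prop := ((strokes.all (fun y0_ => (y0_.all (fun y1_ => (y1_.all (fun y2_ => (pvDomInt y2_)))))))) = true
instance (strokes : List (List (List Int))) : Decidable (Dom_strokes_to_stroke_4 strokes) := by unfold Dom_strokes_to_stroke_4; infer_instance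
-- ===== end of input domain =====

-- B fuses A's two passes (annotate all points with pen flags, then index-walk the copy
-- building deltas) into one pass over the strokes keeping only the previous point.

-- ===== PORT A =====
def strokes_to_stroke_4 (strokes : List (List (List Int))) : List (List Int) :=
  let sample := strokes.foldl (fun sample stroke =>
    (PySem.List.pyRange 0 (stroke.length : Int) 1).foldl (fun sample point_index =>
      let pt := PySem.List.pyGetD stroke point_index []
      if point_index = (stroke.length : Int) - 1 then
        sample ++ [[PySem.List.pyGetD pt 0 0, PySem.List.pyGetD pt 1 0, 1, 0]]
      else
        sample ++ [[PySem.List.pyGetD pt 0 0, PySem.List.pyGetD pt 1 0, 0, 1]]) sample) []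
  let s0 := PySem.List.pyGetD sample 0 []
  (PySem.List.pyRange 0 (sample.length : Int) 1).foldl (fun target point_index =>
    if point_index = (sample.length : Int) - 1 then target  -- 'break' on the final iteration = no-op
    else
      let cur := PySem.List.pyGetD sample point_index []
      let nxt := PySem.List.pyGetD sample (point_index + 1) []
      target ++ [[PySem.List.pyGetD nxt 0 0 - PySem.List.pyGetD cur 0 0,
                  PySem.List.pyGetD nxt 1 0 - PySem.List.pyGetD cur 1 0,
                  PySem.List.pyGetD nxt 2 0, PySem.List.pyGetD nxt 3 0]])
    [[PySem.List.pyGetD s0 0 0, PySem.List.pyGetD s0 1 0, 0, 1]]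

-- ===== PORT B =====
def strokes_to_stroke_4_alt (strokes : List (List (List Int))) : List (List Int) :=
  (strokes.foldl (fun acc stroke =>
    (PySem.List.enumerate stroke).foldl
      (fun (acc : List (List Int) × Option (Int × Int)) ip =>
        let x := PySem.List.pyGetD ip.2 0 0
        let y := PySem.List.pyGetD ip.2 1 0
        match acc.2 with
        | none => (acc.1 ++ [[x, y, 0, 1]], some (x, y))
        | some p =>
          if ip.1 = (stroke.length : Int) - 1 then
            (acc.1 ++ [[x - p.1, y - p.2, 1, 0]], some (x, y))
          else
            (acc.1 ++ [[x - p.1, y - p.2, 0, 1]], some (x, y))) acc) (([], none) : List (List Int) × Option (Int × Int))).1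

-- ===== PRECONDITION & SPEC =====
-- Pre_ excludes exactly the inputs where Python A raises IndexError: no point at all
-- (sample[0] fails) or some point with fewer than two coordinates (point[1] fails).
def Pre_strokes_to_stroke_4 (strokes : List (List (List Int))) : Prop :=
  (∃ s ∈ strokes, s ≠ []) ∧ ∀ s ∈ strokes, ∀ p ∈ s, 2 ≤ p.length
instance (strokes : List (List (List Int))) : Decidable (Pre_strokes_to_stroke_4 strokes) := by unfold Pre_strokes_to_stroke_4; infer_instance
def pvWitness_strokes_to_stroke_4 : List (List (List Int)) := [[[0, 0], [3, 4]], [[1, 1]]]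

def Spec_strokes_to_stroke_4 (strokes : List (List (List Int))) (out : List (List Int)) : Prop := out = strokes_to_stroke_4_alt strokes
instance (strokes : List (List (List Int))) (out : List (List Int)) : Decidable (Spec_strokes_to_stroke_4 strokes out) := by unfold Spec_strokes_to_stroke_4; infer_instance

-- ===== CLAIM (what is proved, stated in full; the proofs are below) =====
def Claim_equal_strokes_to_stroke_4 : Prop := ∀ (strokes : List (List (List Int))), Dom_strokes_to_stroke_4 strokes → Pre_strokes_to_stroke_4 strokes → Spec_strokes_to_stroke_4 strokes (strokes_to_stroke_4 strokes)

-- ===== LEMMAS AND PROOFS =====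

-- each point annotated with (x, y, p1, p2): last point of a stroke gets (1,0), others (0,1)
def pvAnn : List (List Int) → List (Int × Int × Int × Int)
  | [] => []
  | [p] => [(PySem.List.pyGetD p 0 0, PySem.List.pyGetD p 1 0, 1, 0)]
  | p :: q :: r => (PySem.List.pyGetD p 0 0, PySem.List.pyGetD p 1 0, 0, 1) :: pvAnn (q :: r)

def pvEnc (q : Int × Int × Int × Int) : List Int := [q.1, q.2.1, q.2.2.1, q.2.2.2]

def pvStep (acc : List (List Int) × Option (Int × Int)) (q : Int × Int × Int × Int) :
    List (List Int) × Option (Int × Int) :=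
  match acc.2 with
  | none => (acc.1 ++ [[q.1, q.2.1, 0, 1]], some (q.1, q.2.1))
  | some p => (acc.1 ++ [[q.1 - p.1, q.2.1 - p.2, q.2.2.1, q.2.2.2]], some (q.1, q.2.1))

def pvDeltas : (Int × Int) → List (Int × Int × Int × Int) → List (List Int)
  | _, [] => []
  | pr, q :: r => [q.1 - pr.1, q.2.1 - pr.2, q.2.2.1, q.2.2.2] :: pvDeltas (q.1, q.2.1) r


def pvMk (a b : List Int) : List Int :=
  [PySem.List.pyGetD b 0 0 - PySem.List.pyGetD a 0 0,
   PySem.List.pyGetD b 1 0 - PySem.List.pyGetD a 1 0,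
   PySem.List.pyGetD b 2 0, PySem.List.pyGetD b 3 0]

-- A's inner per-stroke loop, recast over 'enumerate': appends each annotated point
lemma pvEnumFoldA (xs : List (List Int)) :
    ∀ (s t : Int) (init : List (List Int)), t = s + xs.length - 1 →
    (PySem.List.enumerate xs s).foldl
      (fun acc ip =>
        if ip.1 = t then acc ++ [[PySem.List.pyGetD ip.2 0 0, PySem.List.pyGetD ip.2 1 0, 1, 0]]
        else acc ++ [[PySem.List.pyGetD ip.2 0 0, PySem.List.pyGetD ip.2 1 0, 0, 1]]) init
    = init ++ (pvAnn xs).map pvEnc := by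
  induction xs with
  | nil => intro s t init h; simp [PySem.List.enumerate_nil, pvAnn]
  | cons p rest ih =>
    intro s t init h
    rw [PySem.List.enumerate_cons, List.foldl_cons]
    cases rest with
    | nil =>
      have hs : s = t := by simp at h; omega
      simp [PySem.List.enumerate_nil, hs, pvAnn, pvEnc]
    | cons q rr =>
      have hs : ¬ (s = t) := by
        simp only [List.length_cons] at h; push_cast at h; omega
      simp only [hs, if_false]
      rw [ih (s + 1) t _ (by simp only [List.length_cons] at h ⊢; push_cast at h ⊢; omega)]
      simp [pvAnn, pvEnc]

-- the per-stroke range loop of A equals appending the annotated stroke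
lemma pvStrokeFoldA (stroke : List (List Int)) (init : List (List Int)) :
    (PySem.List.pyRange 0 (stroke.length : Int) 1).foldl (fun sample point_index =>
      let pt := PySem.List.pyGetD stroke point_index []
      if point_index = (stroke.length : Int) - 1 then
        sample ++ [[PySem.List.pyGetD pt 0 0, PySem.List.pyGetD pt 1 0, 1, 0]]
      else
        sample ++ [[PySem.List.pyGetD pt 0 0, PySem.List.pyGetD pt 1 0, 0, 1]]) init
    = init ++ (pvAnn stroke).map pvEnc := by
  have h2 := pvEnumFoldA stroke 0 ((stroke.length : Int) - 1) init (by omega)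
  rw [PySem.List.enumerate_eq_map_pyRange (xs := stroke) (d := ([] : List Int)),
      List.foldl_map] at h2
  simpa using h2

-- A's first pass builds the encoded annotated point list
lemma pvSampleEq (strokes : List (List (List Int))) :
    ∀ init : List (List Int),
    strokes.foldl (fun sample stroke =>
      (PySem.List.pyRange 0 (stroke.length : Int) 1).foldl (fun sample point_index =>
        let pt := PySem.List.pyGetD stroke point_index []
        if point_index = (stroke.length : Int) - 1 then
          sample ++ [[PySem.List.pyGetD pt 0 0, PySem.List.pyGetD pt 1 0, 1, 0]]
        else
          sample ++ [[PySem.List.pyGetD pt 0 0, PySem.List.pyGetD pt 1 0, 0, 1]]) sample) init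
    = init ++ (strokes.flatMap pvAnn).map pvEnc := by
  induction strokes with
  | nil => intro init; simp
  | cons s rest ih =>
    intro init
    rw [List.foldl_cons, pvStrokeFoldA, ih]
    simp

-- the index-walk over consecutive pairs equals a map over zip with the tail
lemma pvRangeMapZip (sample : List (List Int)) :
    (PySem.List.pyRange 0 ((sample.length : Int) - 1) 1).map (fun point_index =>
       pvMk (PySem.List.pyGetD sample point_index [])
            (PySem.List.pyGetD sample (point_index + 1) []))
    = (sample.zip sample.tail).map (fun ab => pvMk ab.1 ab.2) := by
  apply List.ext_getElem
  · simp only [List.length_map, PySem.List.length_pyRange_one, List.length_zip,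
      List.length_tail, Int.sub_zero]
    omega
  · intro k h1 h2
    have hk : k < sample.length - 1 := by
      simp [PySem.List.length_pyRange_one] at h1; omega
    have hk1 : k + 1 < sample.length := by omega
    simp only [List.getElem_map, PySem.List.getElem_pyRange_one, List.getElem_zip]
    rw [show ((0 : Int) + (k : Int) + 1) = (((k + 1 : Nat)) : Int) by push_cast; ring,
        show ((0 : Int) + (k : Int)) = ((k : Nat) : Int) by ring,
        PySem.List.pyGetD_natCast, PySem.List.pyGetD_natCast]
    congr 1
    · rw [List.getD_eq_getElem _ _ (by omega)]
    · rw [List.getD_eq_getElem _ _ hk1, List.getElem_tail]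

-- A's second loop: skip the last index, append a delta row for every other index
lemma pvTargetFold (sample : List (List Int)) (init : List (List Int)) (hne : sample ≠ []) :
    (PySem.List.pyRange 0 (sample.length : Int) 1).foldl (fun target point_index =>
      if point_index = (sample.length : Int) - 1 then target
      else
        let cur := PySem.List.pyGetD sample point_index []
        let nxt := PySem.List.pyGetD sample (point_index + 1) []
        target ++ [[PySem.List.pyGetD nxt 0 0 - PySem.List.pyGetD cur 0 0,
                    PySem.List.pyGetD nxt 1 0 - PySem.List.pyGetD cur 1 0,
                    PySem.List.pyGetD nxt 2 0, PySem.List.pyGetD nxt 3 0]]) init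
    = init ++ (sample.zip sample.tail).map (fun ab => pvMk ab.1 ab.2) := by
  have hlen : 1 ≤ sample.length := List.length_pos_iff.mpr hne
  have hsplit : PySem.List.pyRange 0 (sample.length : Int) 1
      = PySem.List.pyRange 0 ((sample.length : Int) - 1) 1 ++ [(sample.length : Int) - 1] := by
    have hsing : PySem.List.pyRange ((sample.length : Int) - 1) (sample.length : Int) 1
        = [(sample.length : Int) - 1] := by
      rw [PySem.List.pyRange_one_cons (by omega), PySem.List.pyRange_one_eq_nil (by omega)]
    rw [PySem.List.pyRange_one_append 0 ((sample.length : Int) - 1) (sample.length : Int)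
        (by omega) (by omega), hsing]
  rw [hsplit, List.foldl_append]
  simp only [List.foldl_cons, List.foldl_nil, reduceIte]
  have hcong : (PySem.List.pyRange 0 ((sample.length : Int) - 1) 1).foldl
      (fun target point_index =>
        if point_index = (sample.length : Int) - 1 then target
        else
          target ++ [[PySem.List.pyGetD (PySem.List.pyGetD sample (point_index + 1) []) 0 0 -
                        PySem.List.pyGetD (PySem.List.pyGetD sample point_index []) 0 0,
                      PySem.List.pyGetD (PySem.List.pyGetD sample (point_index + 1) []) 1 0 -
                        PySem.List.pyGetD (PySem.List.pyGetD sample point_index []) 1 0,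
                      PySem.List.pyGetD (PySem.List.pyGetD sample (point_index + 1) []) 2 0,
                      PySem.List.pyGetD (PySem.List.pyGetD sample (point_index + 1) []) 3 0]]) init
      = (PySem.List.pyRange 0 ((sample.length : Int) - 1) 1).foldl
      (fun target point_index =>
        target ++ [pvMk (PySem.List.pyGetD sample point_index [])
                        (PySem.List.pyGetD sample (point_index + 1) [])]) init := by
    apply PySem.List.foldl_congr_mem
    intro acc x hx
    rw [PySem.List.mem_pyRange_one] at hx
    have hxx : ¬ (x = (sample.length : Int) - 1) := by omega
    simp [hxx, pvMk]
  rw [hcong, PySem.List.foldl_append_singleton_eq_map, pvRangeMapZip]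

-- B's inner loop body, named so the fold can be reasoned about
def pvBBody (t : Int) (acc : List (List Int) × Option (Int × Int)) (ip : Int × List Int) :
    List (List Int) × Option (Int × Int) :=
  let x := PySem.List.pyGetD ip.2 0 0
  let y := PySem.List.pyGetD ip.2 1 0
  match acc.2 with
  | none => (acc.1 ++ [[x, y, 0, 1]], some (x, y))
  | some p =>
    if ip.1 = t then
      (acc.1 ++ [[x - p.1, y - p.2, 1, 0]], some (x, y))
    else
      (acc.1 ++ [[x - p.1, y - p.2, 0, 1]], some (x, y))

-- B's inner per-stroke loop equals folding pvStep over the annotated stroke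
lemma pvEnumFoldB (xs : List (List Int)) :
    ∀ (s t : Int) (acc : List (List Int) × Option (Int × Int)), t = s + xs.length - 1 →
    (PySem.List.enumerate xs s).foldl (pvBBody t) acc = (pvAnn xs).foldl pvStep acc := by
  induction xs with
  | nil => intro s t acc h; simp [PySem.List.enumerate_nil, pvAnn]
  | cons p rest ih =>
    intro s t acc h
    rw [PySem.List.enumerate_cons, List.foldl_cons]
    cases rest with
    | nil =>
      have hs : s = t := by simp at h; omega
      have hstep : pvBBody t acc (s, p)
          = pvStep acc (PySem.List.pyGetD p 0 0, PySem.List.pyGetD p 1 0, 1, 0) := by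
        obtain ⟨out, prev⟩ := acc
        cases prev with
        | none => simp [pvBBody, pvStep]
        | some pr => simp [pvBBody, pvStep, hs]
      rw [hstep]
      simp [PySem.List.enumerate_nil, pvAnn]
    | cons q rr =>
      have hs : ¬ (s = t) := by
        simp only [List.length_cons] at h; push_cast at h; omega
      have hstep : pvBBody t acc (s, p)
          = pvStep acc (PySem.List.pyGetD p 0 0, PySem.List.pyGetD p 1 0, 0, 1) := by
        obtain ⟨out, prev⟩ := acc
        cases prev with
        | none => simp [pvBBody, pvStep]
        | some pr => simp [pvBBody, pvStep, hs]
      rw [hstep]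
      rw [ih (s + 1) t _ (by simp only [List.length_cons] at h ⊢; push_cast at h ⊢; omega)]
      simp [pvAnn]

-- B equals folding pvStep over the whole annotated point sequence
lemma pvBEq (strokes : List (List (List Int))) :
    ∀ acc : List (List Int) × Option (Int × Int),
    strokes.foldl (fun acc stroke =>
      (PySem.List.enumerate stroke).foldl
        (fun (acc : List (List Int) × Option (Int × Int)) ip =>
          let x := PySem.List.pyGetD ip.2 0 0
          let y := PySem.List.pyGetD ip.2 1 0
          match acc.2 with
          | none => (acc.1 ++ [[x, y, 0, 1]], some (x, y))
          | some p =>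
            if ip.1 = (stroke.length : Int) - 1 then
              (acc.1 ++ [[x - p.1, y - p.2, 1, 0]], some (x, y))
            else
              (acc.1 ++ [[x - p.1, y - p.2, 0, 1]], some (x, y))) acc) acc
    = (strokes.flatMap pvAnn).foldl pvStep acc := by
  induction strokes with
  | nil => intro acc; simp
  | cons s rest ih =>
    intro acc
    rw [List.foldl_cons, List.flatMap_cons, List.foldl_append, ← ih]
    congr 1
    have hb : (fun (acc : List (List Int) × Option (Int × Int)) (ip : Int × List Int) =>
        let x := PySem.List.pyGetD ip.2 0 0
        let y := PySem.List.pyGetD ip.2 1 0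
        match acc.2 with
        | none => (acc.1 ++ [[x, y, 0, 1]], some (x, y))
        | some p =>
          if ip.1 = (s.length : Int) - 1 then
            (acc.1 ++ [[x - p.1, y - p.2, 1, 0]], some (x, y))
          else
            (acc.1 ++ [[x - p.1, y - p.2, 0, 1]], some (x, y)))
        = pvBBody ((s.length : Int) - 1) := rfl
    rw [hb]
    exact pvEnumFoldB s 0 ((s.length : Int) - 1) acc (by omega)

def pvLast (pr : Int × Int) : List (Int × Int × Int × Int) → Int × Int
  | [] => pr
  | q :: r => pvLast (q.1, q.2.1) r

lemma pvStepFold (rest : List (Int × Int × Int × Int)) :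
    ∀ (out : List (List Int)) (pr : Int × Int),
    rest.foldl pvStep (out, some pr) = (out ++ pvDeltas pr rest, some (pvLast pr rest)) := by
  induction rest with
  | nil => intro out pr; simp [pvDeltas, pvLast]
  | cons q r ih =>
    intro out pr
    rw [List.foldl_cons]
    show List.foldl pvStep (out ++ [[q.1 - pr.1, q.2.1 - pr.2, q.2.2.1, q.2.2.2]], some (q.1, q.2.1)) r = _
    rw [ih]
    simp [pvDeltas, pvLast]

-- deltas of the zip-with-tail of encoded points
lemma pvZipDeltas (rest : List (Int × Int × Int × Int)) :
    ∀ p0 : Int × Int × Int × Int,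
    ((pvEnc p0 :: rest.map pvEnc).zip (rest.map pvEnc)).map (fun ab => pvMk ab.1 ab.2)
    = pvDeltas (p0.1, p0.2.1) rest := by
  induction rest with
  | nil => intro p0; simp [pvDeltas]
  | cons q r ih =>
    intro p0
    simp only [List.map_cons, List.zip_cons_cons, List.map_cons]
    rw [ih q]
    simp [pvDeltas, pvMk, pvEnc, PySem.List.pyGetD]

lemma pvAnn_ne_nil (s : List (List Int)) (h : s ≠ []) : pvAnn s ≠ [] := by
  cases s with
  | nil => exact absurd rfl h
  | cons p r => cases r <;> simp [pvAnn]

-- ===== VERDICT (by name: the statement is the Claim_ definition above) =====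
theorem strokes_to_stroke_4_spec : Claim_equal_strokes_to_stroke_4 := by
  intro strokes hdom hpre
  obtain ⟨⟨s, hs, hsne⟩, _⟩ := hpre
  have hpts : strokes.flatMap pvAnn ≠ [] := by
    intro hnil
    exact pvAnn_ne_nil s hsne (List.flatMap_eq_nil_iff.mp hnil s hs)
  obtain ⟨p0, rest, hp⟩ := List.exists_cons_of_ne_nil hpts
  show strokes_to_stroke_4 strokes = strokes_to_stroke_4_alt strokes
  rw [strokes_to_stroke_4, strokes_to_stroke_4_alt]
  rw [pvSampleEq, pvBEq, hp]
  simp only [List.nil_append, List.map_cons]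
  rw [pvTargetFold _ _ (by simp)]
  rw [List.foldl_cons]
  show _ = (List.foldl pvStep ([[p0.1, p0.2.1, 0, 1]], some (p0.1, p0.2.1)) rest).1
  rw [pvStepFold]
  simp only [PySem.List.pyGetD_zero_cons, List.tail_cons]
  rw [pvZipDeltas]
  simp [pvEnc, PySem.List.pyGetD]
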